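-- pv_equiv track=rewrite | github.com/BhuvaneshBhatt/SpecialFunctions | MultiplePolylogarithms/src/hpl.py | zeta_to_hpl
-- ===== SOURCE A (Python) =====
-- def zeta_to_hpl(mm: tuple[int, ...]) -> tuple[int, ...]:
--     """
--     Convert MZV parameter list to HPL parameter list.
--     Inverse of hpl_to_zeta.
--     """
--     mm = list(mm)
--     n = len(mm)
--     if n == 0:
--         return ()
--     # cumulative product of signs of all but last element
--     cum_sign = 1
--     result = []
--     for i in range(n):
--         if i < n - 1:
--             partial = 1
--             for k in range(i):
--                 partial *= _sign(mm[k])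
--             # sign factor for position i is product of sign(mm[0..i-1])
--             pass
--         result.append(mm[i])
--     # Correct implementation: zeta[k] = hpl[k] * sign(hpl[0])*...*sign(hpl[k-1])
--     # so hpl[k] = zeta[k] / (sign(hpl[0])*...*sign(hpl[k-1]))
--     # We reconstruct hpl iteratively
--     hpl = [0] * n
--     for i in range(n):
--         if i == 0:
--             hpl[i] = mm[i]
--         else:
--             cum = 1
--             for k in range(i):
--                 cum *= _sign(hpl[k])
--             hpl[i] = mm[i] * cum  # since zeta[i] = hpl[i] * cum, hpl[i] = zeta[i]/cum = zeta[i]*cum (cum = ±1)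
--     return tuple(hpl)
--
-- def _sign(x) -> int:
--     if x > 0:
--         return 1
--     elif x < 0:
--         return -1
--     return 0
-- ===== SOURCE B (Python) =====
-- def zeta_to_hpl(mm):
--     """
--     Convert MZV parameter list to HPL parameter list (inverse of hpl_to_zeta).
--     One pass, no running product: once the nonzero prefix invariant holds, the
--     cumulative sign product collapses to the sign of the previous element, and
--     it is 0 forever after the first zero element.
--     """
--     if not mm:
--         return ()
--     out = [mm[0]]
--     zero_seen = mm[0] == 0
--     prev = mm[0]
--     for cur in mm[1:]:
--         out.append(0 if zero_seen else cur * (1 if prev > 0 else -1))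
--         zero_seen = zero_seen or cur == 0
--         prev = cur
--     return tuple(out)
-- ===== Notes on version B (the rewrite author's own statement) =====
-- stated objective: simpler
-- what changed: Replaced the quadratic reconstruction (recomputing the cumulative product of signs of the already-built prefix at every index, plus a dead first loop) by a single pass that carries only a zero-seen flag and the previous element, using that the cumulative sign product equals sign(previous element) while the prefix is nonzero and 0 afterwards.
import Mathlib
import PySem

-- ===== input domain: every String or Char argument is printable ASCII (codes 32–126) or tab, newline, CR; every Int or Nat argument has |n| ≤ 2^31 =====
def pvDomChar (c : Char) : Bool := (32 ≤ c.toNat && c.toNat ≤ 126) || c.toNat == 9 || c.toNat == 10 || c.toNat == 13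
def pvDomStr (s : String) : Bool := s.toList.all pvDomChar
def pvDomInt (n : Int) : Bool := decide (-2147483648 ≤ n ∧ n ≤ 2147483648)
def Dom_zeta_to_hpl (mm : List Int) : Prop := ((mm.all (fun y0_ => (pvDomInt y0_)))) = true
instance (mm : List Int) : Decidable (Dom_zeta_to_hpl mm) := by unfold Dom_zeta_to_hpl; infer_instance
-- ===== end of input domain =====

-- B replaces A's quadratic sign-product reconstruction (with A's dead first loop) by one
-- linear pass carrying a zero-seen flag and the previous element; return value only.

-- ===== PORT A =====
-- _sign helper of the module
def pySign (x : Int) : Int := if x > 0 then 1 else if x < 0 then -1 else 0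

def zeta_to_hpl (mm : List Int) : List Int :=
  let n := mm.length
  if n = 0 then []
  else
    -- first loop of A: builds `result` (computing `partial` on the way); both are unused
    let _result := (List.range n).foldl (fun r i =>
      let _partial := if i < n - 1 then (List.range i).foldl (fun p k => p * pySign (mm.getD k 0)) 1 else 1
      r ++ [mm.getD i 0]) ([] : List Int)
    -- hpl = [0] * n, then reconstruct iteratively
    (List.range n).foldl (fun hpl i =>
      if i = 0 then hpl.set i (mm.getD i 0)
      else
        let cum := (List.range i).foldl (fun c k => c * pySign (hpl.getD k 0)) 1
        hpl.set i (mm.getD i 0 * cum)) (List.replicate n (0 : Int))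

-- ===== PORT B =====
def zeta_to_hpl_alt (mm : List Int) : List Int :=
  match mm with
  | [] => []
  | m0 :: rest =>
    (rest.foldl (fun (st : List Int × Bool × Int) cur =>
      (st.1 ++ [if st.2.1 then 0 else cur * (if st.2.2 > 0 then 1 else -1)],
       st.2.1 || cur == 0, cur)) ([m0], m0 == 0, m0)).1

-- ===== PRECONDITION & SPEC =====
def Spec_zeta_to_hpl (mm : List Int) (out : List Int) : Prop := out = zeta_to_hpl_alt mm
instance (mm : List Int) (out : List Int) : Decidable (Spec_zeta_to_hpl mm out) := by unfold Spec_zeta_to_hpl; infer_instance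

-- ===== CLAIM (what is proved, stated in full; the proofs are below) =====
def Claim_equal_zeta_to_hpl : Prop := ∀ (mm : List Int), Dom_zeta_to_hpl mm → Spec_zeta_to_hpl mm (zeta_to_hpl mm)

-- ===== LEMMAS AND PROOFS =====

-- recursive rendering of B's loop (proof helper)
def altGo (zs : Bool) (prev : Int) : List Int → List Int
  | [] => []
  | cur :: rest =>
      (if zs then 0 else cur * (if prev > 0 then 1 else -1)) :: altGo (zs || cur == 0) cur rest

lemma altGo_length (zs : Bool) (prev : Int) (l : List Int) :
    (altGo zs prev l).length = l.length := by
  induction l generalizing zs prev with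
  | nil => rfl
  | cons c t ih => simp [altGo, ih]

lemma foldB (l : List Int) (acc : List Int) (zs : Bool) (prev : Int) :
    (l.foldl (fun (st : List Int × Bool × Int) cur =>
      (st.1 ++ [if st.2.1 then 0 else cur * (if st.2.2 > 0 then 1 else -1)],
       st.2.1 || cur == 0, cur)) (acc, zs, prev)).1 = acc ++ altGo zs prev l := by
  induction l generalizing acc zs prev with
  | nil => simp [altGo]
  | cons c t ih =>
    rw [List.foldl_cons]
    refine (ih _ _ _).trans ?_
    simp [altGo]

lemma alt_cons (m0 : Int) (rest : List Int) :
    zeta_to_hpl_alt (m0 :: rest) = m0 :: altGo (m0 == 0) m0 rest := by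
  simp only [zeta_to_hpl_alt]
  rw [foldB]
  rfl

lemma alt_length (mm : List Int) : (zeta_to_hpl_alt mm).length = mm.length := by
  cases mm with
  | nil => rfl
  | cons m0 rest => simp [alt_cons, altGo_length]

-- closed form of B's output at each index
def specAt (mm : List Int) (i : Nat) : Int :=
  if (0 : Int) ∈ mm.take i then 0
  else mm.getD i 0 * (if i = 0 then 1 else pySign (mm.getD (i - 1) 0))

lemma altGo_getD (zs : Bool) (prev : Int) (l : List Int) (j : Nat)
    (h : zs = false → prev ≠ 0) (hj : j < l.length) :
    (altGo zs prev l).getD j 0 =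
      if zs = true ∨ (0 : Int) ∈ l.take j then 0
      else l.getD j 0 * pySign ((prev :: l).getD j 0) := by
  induction l generalizing zs prev j with
  | nil => simp at hj
  | cons c t ih =>
    cases j with
    | zero =>
      cases zs with
      | true => simp [altGo]
      | false =>
        have hp := h rfl
        simp only [altGo, List.getD_cons_zero, List.take_zero, List.mem_nil_iff, or_false]
        simp only [Bool.false_eq_true, if_false]
        have : (if prev > 0 then (1:Int) else -1) = pySign prev := by
          unfold pySign; split_ifs <;> omega
        simp [this]
    | succ j' =>
      have hj' : j' < t.length := by simpa using hj
      have hzs : (zs || c == 0) = false → c ≠ 0 := by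
        intro hh
        simp at hh
        exact hh.2
      have := ih (zs || c == 0) c j' hzs hj'
      simp only [altGo, List.getD_cons_succ, this, List.take_succ_cons, List.mem_cons]
      by_cases h0 : c = 0 <;> by_cases hz : zs = true
      · simp [h0, hz]
      · simp [h0, hz]
      · simp [hz, Ne.symm h0]
      · simp [h0, hz, Ne.symm h0]

lemma alt_getD (mm : List Int) (i : Nat) (hi : i < mm.length) :
    (zeta_to_hpl_alt mm).getD i 0 = specAt mm i := by
  cases mm with
  | nil => simp at hi
  | cons m0 rest =>
    cases i with
    | zero => simp [alt_cons, specAt]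
    | succ j =>
      have hj : j < rest.length := by simpa using hi
      have hzs : (m0 == 0) = false → m0 ≠ 0 := by
        intro hh; simpa using hh
      rw [alt_cons]
      simp only [List.getD_cons_succ]
      rw [altGo_getD _ _ _ _ hzs hj]
      simp only [specAt, List.take_succ_cons, List.mem_cons, Nat.succ_ne_zero, if_false,
        List.getD_cons_succ, Nat.succ_sub_one]
      by_cases h0 : m0 = 0
      · simp [h0]
      · simp [h0, Ne.symm h0]

lemma pySign_mul_sign (a b : Int) (ha : a ≠ 0) :
    pySign a * pySign (b * pySign a) = pySign b := by
  unfold pySign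
  rcases lt_trichotomy a 0 with h | h | h
  · have : ¬ a > 0 := by omega
    simp only [this, if_false, h, if_true]
    split_ifs <;> omega
  · omega
  · simp only [h, if_true]
    split_ifs <;> omega

-- the inner cumulative product over B's already-built prefix
lemma cum_eq (mm : List Int) (i : Nat) (h1 : 1 ≤ i) (h2 : i ≤ mm.length) :
    (List.range i).foldl (fun c k => c * pySign ((zeta_to_hpl_alt mm).getD k 0)) 1 =
      if (0 : Int) ∈ mm.take i then 0 else pySign (mm.getD (i - 1) 0) := by
  induction i with
  | zero => omega
  | succ j ih =>
    rw [List.range_succ, List.foldl_append]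
    have hjlt : j < mm.length := by omega
    have htake : mm.take (j + 1) = mm.take j ++ [mm.getD j 0] := by
      rw [List.take_add_one]
      congr 1
      rw [List.getElem?_eq_getElem hjlt]
      simp [List.getD_eq_getElem?_getD, List.getElem?_eq_getElem hjlt]
    rcases Nat.eq_zero_or_pos j with hj0 | hjpos
    · subst hj0
      simp only [List.range_zero, List.foldl_nil, List.foldl_cons]
      rw [alt_getD mm 0 hjlt]
      simp only [specAt, List.take_zero, List.mem_nil_iff, if_false, if_true, mul_one, one_mul]
      rw [htake]
      simp only [List.take_zero, List.nil_append, List.mem_singleton]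
      by_cases h0 : mm[0]?.getD 0 = 0
      · simp [h0, pySign]
      · simp [Ne.symm h0]
    · rw [ih hjpos (by omega)]
      simp only [List.foldl_cons, List.foldl_nil]
      rw [alt_getD mm j hjlt]
      by_cases hz : (0 : Int) ∈ mm.take j
      · have : (0 : Int) ∈ mm.take (j + 1) := by
          rw [htake]; exact List.mem_append_left _ hz
        simp [hz, this, specAt]
      · have hprev : mm.getD (j - 1) 0 ≠ 0 := by
          intro h0
          apply hz
          have hlt : j - 1 < (mm.take j).length := by
            simp [List.length_take]; omega
          have : (mm.take j).getD (j - 1) 0 = mm.getD (j - 1) 0 := by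
            simp [List.getD_eq_getElem?_getD, List.getElem?_take_of_lt (by omega : j - 1 < j)]
          rw [← h0, ← this]
          rw [List.getD_eq_getElem _ _ hlt]
          exact List.getElem_mem _
        simp only [hz, if_false, specAt, if_neg (by omega : ¬ j = 0)]
        rw [htake]
        simp only [List.mem_append, List.mem_singleton, hz, false_or, Nat.add_sub_cancel]
        rw [pySign_mul_sign _ _ hprev]
        by_cases h0 : mm[j]?.getD 0 = 0
        · simp [h0, pySign]
        · simp [Ne.symm h0]

-- A's fold invariant: after i steps the list is B's first i entries padded with zeros
lemma foldA_inv (mm : List Int) (i : Nat) (hi : i ≤ mm.length) :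
    (List.range i).foldl (fun hpl k =>
      if k = 0 then hpl.set k (mm.getD k 0)
      else
        let cum := (List.range k).foldl (fun c j => c * pySign (hpl.getD j 0)) 1
        hpl.set k (mm.getD k 0 * cum)) (List.replicate mm.length (0 : Int)) =
      (zeta_to_hpl_alt mm).take i ++ List.replicate (mm.length - i) 0 := by
  induction i with
  | zero => simp
  | succ j ih =>
    rw [List.range_succ, List.foldl_append, ih (by omega)]
    simp only [List.foldl_cons, List.foldl_nil]
    have hjlt : j < mm.length := by omega
    have hlen : ((zeta_to_hpl_alt mm).take j).length = j := by
      simp [List.length_take, alt_length]; omega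
    have htake1 : (zeta_to_hpl_alt mm).take (j + 1) =
        (zeta_to_hpl_alt mm).take j ++ [(zeta_to_hpl_alt mm).getD j 0] := by
      have hjalt : j < (zeta_to_hpl_alt mm).length := by rw [alt_length]; exact hjlt
      rw [List.take_add_one]
      congr 1
      rw [List.getElem?_eq_getElem hjalt]
      simp [List.getD_eq_getElem?_getD, List.getElem?_eq_getElem hjalt]
    have hrep : List.replicate (mm.length - j) (0 : Int) =
        0 :: List.replicate (mm.length - (j + 1)) 0 := by
      have : mm.length - j = (mm.length - (j + 1)) + 1 := by omega
      rw [this, List.replicate_succ]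
    have hset : ∀ v : Int,
        ((zeta_to_hpl_alt mm).take j ++ List.replicate (mm.length - j) 0).set j v =
        (zeta_to_hpl_alt mm).take j ++ (v :: List.replicate (mm.length - (j + 1)) 0) := by
      intro v
      rw [List.set_append_right _ _ (by omega : ((zeta_to_hpl_alt mm).take j).length ≤ j)]
      rw [hlen, Nat.sub_self, hrep]
      simp [List.set_cons_zero]
    have hgetD : ∀ k, k < j →
        ((zeta_to_hpl_alt mm).take j ++ List.replicate (mm.length - j) 0).getD k 0 =
        (zeta_to_hpl_alt mm).getD k 0 := by
      intro k hk
      have hk1 : k < ((zeta_to_hpl_alt mm).take j).length := by omega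
      rw [List.getD_append _ _ _ _ hk1]
      simp [List.getD_eq_getElem?_getD, List.getElem?_take_of_lt hk]
    rcases Nat.eq_zero_or_pos j with hj0 | hjpos
    · subst hj0
      simp only [if_true]
      rw [hset, htake1, alt_getD mm 0 hjlt]
      simp [specAt]
    · rw [if_neg (by omega : ¬ j = 0)]
      have hcum : (List.range j).foldl (fun c k => c * pySign
          (((zeta_to_hpl_alt mm).take j ++ List.replicate (mm.length - j) 0).getD k 0)) 1 =
          (List.range j).foldl (fun c k => c * pySign ((zeta_to_hpl_alt mm).getD k 0)) 1 := by
        apply PySem.List.foldl_congr_mem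
        intro c k hk
        rw [hgetD k (List.mem_range.mp hk)]
      rw [hcum, cum_eq mm j hjpos (by omega), hset, htake1, alt_getD mm j hjlt]
      simp only [specAt, if_neg (by omega : ¬ j = 0)]
      by_cases hz : (0 : Int) ∈ mm.take j <;> simp [hz]

-- ===== VERDICT (by name: the statement is the Claim_ definition above) =====
theorem zeta_to_hpl_spec : Claim_equal_zeta_to_hpl := by
  intro mm _
  show zeta_to_hpl mm = zeta_to_hpl_alt mm
  unfold zeta_to_hpl
  by_cases hn : mm.length = 0
  · simp only [hn, if_true]
    cases mm with
    | nil => rfl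
    | cons a t => simp at hn
  · simp only [hn, if_false]
    rw [foldA_inv mm mm.length (le_refl _)]
    rw [Nat.sub_self]
    simp [List.take_of_length_le (le_of_eq (alt_length mm))]
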